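-- pv_equiv track=rewrite | github.com/pclubiitk/model-zoo | Image Captioning/dataloader.py | load_selected_captions
-- ===== SOURCE A (Python) =====
-- def load_selected_captions(dataset, entire_dataset):
--
--     train_temp = {}
--     length = 0
--     for i in range(len(entire_dataset)):
--         line = entire_dataset[i].split()
--
--         img_id = line[0]
--
--         if img_id in dataset:
--
--             desc = " ".join(line[1:])
--             desc = "<sos> " + desc + " <eos>"
--
--             if(length<len(desc.split())):
--                 length = len(desc.split())
--
--             if img_id not in train_temp.keys():
--                 train_temp[img_id] = list()
--
--             train_temp[img_id].append(desc)
--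
--     return length, train_temp
-- ===== SOURCE B (Python) =====
-- def load_selected_captions(dataset, entire_dataset):
--     pairs = []
--     for line in entire_dataset:
--         words = line.split()
--         if words[0] in dataset:
--             pairs.append((words[0], "<sos> " + " ".join(words[1:]) + " <eos>"))
--     keys = list(dict.fromkeys(k for k, _ in pairs))
--     train_temp = {k: [d for k2, d in pairs if k2 == k] for k in keys}
--     length = max((len(d.split()) for _, d in pairs), default=0)
--     return length, train_temp
-- ===== Notes on version B (the rewrite author's own statement) =====
-- stated objective: alternative
-- what changed: B replaces A's incremental dict-building loop by a staged pipeline: one pass collects a flat list of (img_id, decorated caption) pairs, the key order is recovered by an ordered dedup of the ids, the dict is then built key-major by a nested scan (one inner filter pass over the pair list per distinct key), and the max caption length is a separate max over the pair list; it trades A's single-pass O(n) grouping for an O(k*n) nested-scan grouping.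
import Mathlib
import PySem

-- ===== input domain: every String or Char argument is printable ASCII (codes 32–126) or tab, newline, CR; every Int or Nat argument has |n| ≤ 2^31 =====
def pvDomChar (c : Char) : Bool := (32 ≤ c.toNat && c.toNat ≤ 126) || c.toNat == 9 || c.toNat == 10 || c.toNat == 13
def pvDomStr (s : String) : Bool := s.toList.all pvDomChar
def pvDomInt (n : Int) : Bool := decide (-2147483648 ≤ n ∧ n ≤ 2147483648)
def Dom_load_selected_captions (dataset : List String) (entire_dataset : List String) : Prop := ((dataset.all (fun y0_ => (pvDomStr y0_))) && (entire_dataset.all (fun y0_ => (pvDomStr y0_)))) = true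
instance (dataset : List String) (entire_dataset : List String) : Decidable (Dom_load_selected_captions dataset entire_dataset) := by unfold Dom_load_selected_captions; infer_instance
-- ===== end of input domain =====

-- B is an alternative algorithm: a staged pipeline (flat pair list, ordered key dedup, key-major
-- nested-scan grouping, separate max over the pair list) instead of A's single incremental
-- dict-building loop with a running max. Same answers; no speed claim.

-- ===== PORT A =====
def load_selected_captions (dataset : List String) (entire_dataset : List String) : Int × (List (String × List String)) :=
  let st :=
    (PySem.List.pyRange 0 (PySem.List.len entire_dataset) 1).foldl
      (fun (st : Int × PySem.Dict String (List String)) i =>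
        let line := PySem.Str.split₀ (PySem.List.pyGetD entire_dataset i "")
        let img_id := PySem.List.pyGetD line 0 ""
        if img_id ∈ dataset then
          let desc := PySem.Str.join " " (PySem.List.slice line (some 1) none)
          let desc := "<sos> " ++ desc ++ " <eos>"
          let length := if st.1 < PySem.List.len (PySem.Str.split₀ desc) then
              PySem.List.len (PySem.Str.split₀ desc) else st.1
          let d := if st.2.contains img_id then st.2 else st.2.insert img_id []
          (length, d.modify img_id [] (fun l => l ++ [desc]))
        else st)
      ((0 : Int), (PySem.Dict.empty : PySem.Dict String (List String)))
  (st.1, st.2.items)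

-- ===== PORT B =====
def load_selected_captions_alt (dataset : List String) (entire_dataset : List String) : Int × (List (String × List String)) :=
  let pairs :=
    entire_dataset.foldl
      (fun (ps : List (String × String)) line =>
        let words := PySem.Str.split₀ line
        if PySem.List.pyGetD words 0 "" ∈ dataset then
          ps ++ [(PySem.List.pyGetD words 0 "",
                  "<sos> " ++ PySem.Str.join " " (PySem.List.slice words (some 1) none) ++ " <eos>")]
        else ps)
      []
  let keys := PySem.List.dedup (pairs.map Prod.fst)    -- list(dict.fromkeys(...))
  let train_temp :=
    keys.foldl
      (fun (d : PySem.Dict String (List String)) k =>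
        d.insert k ((pairs.filter (fun p => p.1 == k)).map Prod.snd))
      (PySem.Dict.empty : PySem.Dict String (List String))
  let length := (pairs.map (fun p => PySem.List.len (PySem.Str.split₀ p.2))).foldl max 0
  (length, train_temp.items)

-- ===== PRECONDITION & SPEC =====
-- Pre_ excludes exactly the inputs where some line of entire_dataset splits into no words
-- (empty/whitespace-only line): there Python A raises IndexError on line[0], and so does B.
def Pre_load_selected_captions (dataset : List String) (entire_dataset : List String) : Prop :=
  ∀ s ∈ entire_dataset, PySem.Str.split₀ s ≠ []
instance (dataset : List String) (entire_dataset : List String) : Decidable (Pre_load_selected_captions dataset entire_dataset) := by unfold Pre_load_selected_captions; infer_instance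
def pvWitness_load_selected_captions : List String × List String :=
  (["img1", "img2"], ["img1 a cat", "img3 dog", "img1 two cats"])

def Spec_load_selected_captions (dataset : List String) (entire_dataset : List String) (out : Int × (List (String × List String))) : Prop := out = load_selected_captions_alt dataset entire_dataset
instance (dataset : List String) (entire_dataset : List String) (out : Int × (List (String × List String))) : Decidable (Spec_load_selected_captions dataset entire_dataset out) := by unfold Spec_load_selected_captions; infer_instance

-- ===== CLAIM (what is proved, stated in full; the proofs are below) =====
def Claim_equal_load_selected_captions : Prop := ∀ (dataset : List String) (entire_dataset : List String), Dom_load_selected_captions dataset entire_dataset → Pre_load_selected_captions dataset entire_dataset → Spec_load_selected_captions dataset entire_dataset (load_selected_captions dataset entire_dataset)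

-- ===== LEMMAS AND PROOFS =====

-- word count of a caption string
def pvWC (s : String) : Int := PySem.List.len (PySem.Str.split₀ s)

-- the decorated description built from a raw line
def pvDesc (s : String) : String :=
  "<sos> " ++ PySem.Str.join " " (PySem.List.slice (PySem.Str.split₀ s) (some 1) none) ++ " <eos>"

-- the image id of a raw line
def pvKey (s : String) : String := PySem.List.pyGetD (PySem.Str.split₀ s) 0 ""

-- the kept lines, and the pair list B builds
def pvLines (ds es : List String) : List String := es.filter (fun s => decide (pvKey s ∈ ds))
def pvPairs (ds es : List String) : List (String × String) :=
  (pvLines ds es).map (fun s => (pvKey s, pvDesc s))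

-- B's pair-collecting loop body
def pvStepP (ds : List String) (ps : List (String × String)) (s : String) : List (String × String) :=
  if pvKey s ∈ ds then ps ++ [(pvKey s, pvDesc s)] else ps

theorem pv_pairs_fold (ds : List String) (es : List String) :
    ∀ acc, es.foldl (pvStepP ds) acc = acc ++ pvPairs ds es := by
  induction es with
  | nil => intro acc; simp [pvPairs, pvLines]
  | cons s es ih =>
    intro acc
    simp only [List.foldl_cons, ih, pvStepP]
    by_cases h : pvKey s ∈ ds
    · simp [pvPairs, pvLines, h]
    · simp [pvPairs, pvLines, h]

-- A's loop body, as a function of the current line string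
def pvStepA (dataset : List String) (st : Int × PySem.Dict String (List String)) (s : String) :
    Int × PySem.Dict String (List String) :=
  let line := PySem.Str.split₀ s
  let img_id := PySem.List.pyGetD line 0 ""
  if img_id ∈ dataset then
    let desc := PySem.Str.join " " (PySem.List.slice line (some 1) none)
    let desc := "<sos> " ++ desc ++ " <eos>"
    let length := if st.1 < PySem.List.len (PySem.Str.split₀ desc) then
        PySem.List.len (PySem.Str.split₀ desc) else st.1
    let d := if st.2.contains img_id then st.2 else st.2.insert img_id []
    (length, d.modify img_id [] (fun l => l ++ [desc]))
  else st

theorem pv_stepA_pos (ds : List String) (L : Int) (d : PySem.Dict String (List String))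
    (s : String) (h : pvKey s ∈ ds) :
    (pvStepA ds (L, d) s).1 = max L (pvWC (pvDesc s)) := by
  unfold pvStepA
  simp only [pvKey] at h
  simp only [h, if_pos]
  show (if L < PySem.List.len (PySem.Str.split₀ _) then PySem.List.len (PySem.Str.split₀ _) else L) = _
  simp only [pvWC, pvDesc]
  split_ifs <;> omega

theorem pv_stepA_neg (ds : List String) (st : Int × PySem.Dict String (List String))
    (s : String) (h : pvKey s ∉ ds) : pvStepA ds st s = st := by
  unfold pvStepA
  simp only [pvKey] at h
  simp [h]

-- A's running max is the max-fold over the kept captions' word counts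
theorem pv_fst_eq (ds : List String) (es : List String) :
    ∀ (L : Int) (d : PySem.Dict String (List String)),
      (es.foldl (pvStepA ds) (L, d)).1 =
        ((pvLines ds es).map (fun s => pvWC (pvDesc s))).foldl max L := by
  induction es with
  | nil => intro L d; rfl
  | cons s es ih =>
    intro L d
    simp only [List.foldl_cons]
    by_cases h : pvKey s ∈ ds
    · have : pvStepA ds (L, d) s = ((pvStepA ds (L, d) s).1, (pvStepA ds (L, d) s).2) := rfl
      rw [this, pv_stepA_pos ds L d s h, ih]
      simp [pvLines, h]
    · rw [pv_stepA_neg ds (L, d) s h, ih]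
      simp [pvLines, h]

-- A's conditional insert-then-append on a kept line is a plain modify
theorem pv_condmodify (d : PySem.Dict String (List String)) (k : String) (x : String) :
    ((if d.contains k then d else d.insert k []).modify k [] (fun l => l ++ [x]))
      = d.modify k [] (fun l => l ++ [x]) := by
  by_cases hc : d.contains k
  · simp [hc]
  · simp only [hc, if_neg, Bool.false_eq_true, not_false_iff]
    show (d.insert k []).insert k ((d.insert k []).getD k [] ++ [x])
        = d.insert k (d.getD k [] ++ [x])
    rw [PySem.Dict.getD_insert_self, PySem.Dict.insert_insert_self,
        PySem.Dict.getD_of_not_contains d [] (by simp [hc])]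

-- A's dict component is B's grouping fold over the pair list (as a modify-append fold)
theorem pv_dict_eq (ds : List String) (es : List String) :
    ∀ (L : Int) (d : PySem.Dict String (List String)),
      (es.foldl (pvStepA ds) (L, d)).2 =
        (pvPairs ds es).foldl (fun d p => d.modify p.1 [] (fun l => l ++ [p.2])) d := by
  induction es with
  | nil => intro L d; rfl
  | cons s es ih =>
    intro L d
    simp only [List.foldl_cons]
    by_cases h : pvKey s ∈ ds
    · have hA : (pvStepA ds (L, d) s).2 = d.modify (pvKey s) [] (fun l => l ++ [pvDesc s]) := by
        unfold pvStepA
        simp only [pvKey] at h ⊢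
        simp only [h, if_pos]
        exact pv_condmodify d _ _
      have : pvStepA ds (L, d) s = ((pvStepA ds (L, d) s).1, (pvStepA ds (L, d) s).2) := rfl
      rw [this, ih, hA]
      simp [pvPairs, pvLines, h]
    · rw [pv_stepA_neg ds (L, d) s h, ih]
      simp [pvPairs, pvLines, h]

-- the two ports agree on every input
theorem pv_ports (ds es : List String) :
    load_selected_captions ds es = load_selected_captions_alt ds es := by
  -- A's index loop is a fold over the lines
  have hr := PySem.List.foldl_pyRange_zero_pyGetD es "" (pvStepA ds)
    ((0 : Int), (PySem.Dict.empty : PySem.Dict String (List String)))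
  have hA : load_selected_captions ds es =
      ((es.foldl (pvStepA ds) ((0 : Int), PySem.Dict.empty)).1,
       (es.foldl (pvStepA ds) ((0 : Int), PySem.Dict.empty)).2.items) :=
    congrArg (fun st => (st.1, st.2.items)) hr
  -- B's pair-building loop produces pvPairs
  have hbody : (fun (ps : List (String × String)) line =>
        let words := PySem.Str.split₀ line
        if PySem.List.pyGetD words 0 "" ∈ ds then
          ps ++ [(PySem.List.pyGetD words 0 "",
                  "<sos> " ++ PySem.Str.join " " (PySem.List.slice words (some 1) none) ++ " <eos>")]
        else ps) = pvStepP ds := rfl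
  have hp : es.foldl
      (fun (ps : List (String × String)) line =>
        let words := PySem.Str.split₀ line
        if PySem.List.pyGetD words 0 "" ∈ ds then
          ps ++ [(PySem.List.pyGetD words 0 "",
                  "<sos> " ++ PySem.Str.join " " (PySem.List.slice words (some 1) none) ++ " <eos>")]
        else ps)
      [] = pvPairs ds es := by
    rw [hbody, pv_pairs_fold]; rfl
  have hB : load_selected_captions_alt ds es =
      (((pvPairs ds es).map (fun p => PySem.List.len (PySem.Str.split₀ p.2))).foldl max 0,
       ((PySem.List.dedup ((pvPairs ds es).map Prod.fst)).foldl
          (fun (d : PySem.Dict String (List String)) k =>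
            d.insert k (((pvPairs ds es).filter (fun p => p.1 == k)).map Prod.snd))
          PySem.Dict.empty).items) := by
    unfold load_selected_captions_alt
    rw [hp]
  rw [hA, hB]
  refine Prod.ext ?_ ?_
  · -- max components
    rw [pv_fst_eq ds es 0 PySem.Dict.empty]
    simp only [pvPairs, List.map_map]
    rfl
  · -- dict components
    rw [pv_dict_eq ds es 0 PySem.Dict.empty]
    set P := pvPairs ds es with hP
    -- A's grouping fold: characterize its items
    set G := P.foldl (fun d p => d.modify p.1 [] (fun l => l ++ [p.2]))
      (PySem.Dict.empty : PySem.Dict String (List String)) with hG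
    have hnd : G.keys.Nodup := by
      rw [hG]
      exact PySem.Dict.nodup_keys_foldl_modify_key P Prod.fst [] _ _ PySem.Dict.nodup_keys_empty
    have hkeys : G.keys = PySem.List.dedup (P.map Prod.fst) := by
      rw [hG, PySem.Dict.keys_foldl_modify_key]
      simp [PySem.Dict.keys_empty, PySem.Set.update_nil_left]
    have hget : ∀ k, G.getD k [] = (P.filter (fun p => p.1 == k)).map Prod.snd := by
      intro k
      rw [hG, PySem.Dict.getD_foldl_modify_append]
      simp
    -- B's key-major fold over fresh, distinct keys
    have hBitems :
        ((PySem.List.dedup (P.map Prod.fst)).foldl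
          (fun (d : PySem.Dict String (List String)) k =>
            d.insert k ((P.filter (fun p => p.1 == k)).map Prod.snd))
          PySem.Dict.empty).items
        = (PySem.List.dedup (P.map Prod.fst)).map
            (fun k => (k, (P.filter (fun p => p.1 == k)).map Prod.snd)) := by
      have h1 : ∀ a ∈ PySem.List.dedup (P.map Prod.fst),
          (PySem.Dict.empty : PySem.Dict String (List String)).contains ((fun a => a) a) = false :=
        fun a _ => PySem.Dict.contains_empty a
      have h2 : ((PySem.List.dedup (P.map Prod.fst)).map (fun a => a)).Nodup := by
        simp
      have h := PySem.Dict.items_foldl_insert_fresh (PySem.List.dedup (P.map Prod.fst))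
        (fun a => a) (fun a => (P.filter (fun p => p.1 == a)).map Prod.snd)
        PySem.Dict.empty h1 h2
      exact h
    rw [hBitems, PySem.Dict.items_eq_map_keys G hnd [], hkeys]
    exact List.map_congr_left (fun k _ => by rw [hget k])

-- ===== VERDICT (by name: the statement is the Claim_ definition above) =====
theorem load_selected_captions_spec : Claim_equal_load_selected_captions := by
  intro ds es _ _
  unfold Spec_load_selected_captions
  exact pv_ports ds es
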